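-- pv_equiv track=rewrite | github.com/thetarro/aoc | 2022/day06/day06.py | find_pattern_position
-- ===== SOURCE A (Python) =====
-- def has_unique_chars(line: str) -> bool:
--     return len(set(x for x in line)) == len(line)
--
-- def find_pattern_position(line: str, pattern_length: int) -> int:
--     index = pattern_length
--     for index in range(len(line) + 1):
--         if index < pattern_length:
--             continue
--         if has_unique_chars(line[index - pattern_length : index]):
--             return index
--     return 0
-- ===== SOURCE B (Python) =====
-- def find_pattern_position(line: str, pattern_length: int) -> int:
--     n = len(line)
--     if pattern_length <= 0 or pattern_length > n:
--         return 0
--     counts = {}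
--     distinct = 0
--     for i, ch in enumerate(line):
--         c = counts.get(ch, 0) + 1
--         counts[ch] = c
--         if c == 1:
--             distinct += 1
--         if i >= pattern_length:
--             old = line[i - pattern_length]
--             oc = counts.get(old, 0) - 1
--             counts[old] = oc
--             if oc == 0:
--                 distinct -= 1
--         if i >= pattern_length - 1 and distinct == pattern_length:
--             return i + 1
--     return 0
-- ===== Notes on version B (the rewrite author's own statement) =====
-- stated objective: faster
-- what changed: Replaces the per-position rescan (building a fresh set of each length-k window) by a single sliding-window pass maintaining a char-frequency dict and a distinct counter updated incrementally.
import Mathlib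
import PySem

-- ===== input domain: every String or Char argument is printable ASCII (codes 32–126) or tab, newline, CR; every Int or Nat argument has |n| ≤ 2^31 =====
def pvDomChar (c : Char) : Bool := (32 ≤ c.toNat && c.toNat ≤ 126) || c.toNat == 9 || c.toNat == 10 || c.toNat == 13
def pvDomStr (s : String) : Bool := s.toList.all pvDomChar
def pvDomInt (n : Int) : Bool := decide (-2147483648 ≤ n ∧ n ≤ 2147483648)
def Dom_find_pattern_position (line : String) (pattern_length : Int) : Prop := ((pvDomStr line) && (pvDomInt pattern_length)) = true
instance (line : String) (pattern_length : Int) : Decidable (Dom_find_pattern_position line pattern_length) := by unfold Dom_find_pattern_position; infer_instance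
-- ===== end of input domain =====

-- B replaces A's per-position window rescan by one sliding-window pass with a char-frequency dict
-- and an incrementally maintained distinct counter (objective: faster, O(n*k) -> O(n)).


-- ===== PORT A =====
-- has_unique_chars: len(set(x for x in line)) == len(line); Python slices a str, ported over its char list (exact)
def pvHasUniqueChars (cs : List Char) : Bool :=
  (PySem.Set.ofList cs).length == cs.length

-- 'for index in range(len(line)+1): continue / return index' with every index tried in order
def pvLoopA (cs : List Char) (pl : Int) : List Int → Int
  | [] => 0
  | i :: rest =>
    if i < pl then pvLoopA cs pl rest
    else if pvHasUniqueChars (PySem.List.slice cs (some (i - pl)) (some i)) then i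
    else pvLoopA cs pl rest

def find_pattern_position (line : String) (pattern_length : Int) : Int :=
  pvLoopA line.toList pattern_length
    (PySem.List.pyRange 0 ((line.toList.length : Int) + 1) 1)

-- ===== PORT B =====
-- one iteration of Source B's loop body: add the incoming char; if the window is full, evict the oldest
def pvStepB (cs : List Char) (pl i : Int) (ch : Char)
    (counts : PySem.Dict Char Int) (distinct : Int) : PySem.Dict Char Int × Int :=
  let c := counts.getD ch 0 + 1
  let counts1 := counts.insert ch c
  let distinct1 := if c = 1 then distinct + 1 else distinct
  if pl ≤ i then
    -- line[i - pattern_length]: the index is always in range here, so the default is never used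
    let old := PySem.List.pyGetD cs (i - pl) ch
    let oc := counts1.getD old 0 - 1
    (counts1.insert old oc, if oc = 0 then distinct1 - 1 else distinct1)
  else (counts1, distinct1)

-- sliding-window loop of Source B over enumerate(line), state = (counts dict, distinct counter)
def pvLoopB (cs : List Char) (pl : Int) :
    List (Int × Char) → PySem.Dict Char Int → Int → Int
  | [], _, _ => 0
  | (i, ch) :: rest, counts, distinct =>
    let st := pvStepB cs pl i ch counts distinct
    if pl - 1 ≤ i ∧ st.2 = pl then i + 1
    else pvLoopB cs pl rest st.1 st.2

def find_pattern_position_alt (line : String) (pattern_length : Int) : Int :=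
  if pattern_length ≤ 0 ∨ (line.toList.length : Int) < pattern_length then 0
  else pvLoopB line.toList pattern_length
    (PySem.List.enumerate line.toList 0) PySem.Dict.empty 0

-- ===== PRECONDITION & SPEC =====
def Spec_find_pattern_position (line : String) (pattern_length : Int) (out : Int) : Prop := out = find_pattern_position_alt line pattern_length
instance (line : String) (pattern_length : Int) (out : Int) : Decidable (Spec_find_pattern_position line pattern_length out) := by unfold Spec_find_pattern_position; infer_instance

-- ===== CLAIM (what is proved, stated in full; the proofs are below) =====
def Claim_equal_find_pattern_position : Prop := ∀ (line : String) (pattern_length : Int), Dom_find_pattern_position line pattern_length → Spec_find_pattern_position line pattern_length (find_pattern_position line pattern_length)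

-- ===== LEMMAS AND PROOFS =====

-- the window of text B's state describes just before processing char k
def pvWin (cs : List Char) (plN k : Nat) : List Char := (cs.take k).drop (k - plN)

-- B's loop invariant: counts is the multiset of window chars, distinct its number of distinct chars
def pvInv (cs : List Char) (plN k : Nat) (counts : PySem.Dict Char Int) (distinct : Int) : Prop :=
  (∀ c : Char, counts.getD c 0 = ((pvWin cs plN k).count c : Int)) ∧
  distinct = (((pvWin cs plN k).toFinset.card : Nat) : Int)

lemma pvCard_ofList (l : List Char) : (PySem.Set.ofList l).length = l.toFinset.card := by
  rw [← List.toFinset_card_of_nodup (PySem.Set.nodup_ofList l)]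
  congr 1
  apply Finset.ext
  intro a
  simp [PySem.Set.mem_ofList]

lemma pvHasUnique_iff (l : List Char) :
    pvHasUniqueChars l = true ↔ l.toFinset.card = l.length := by
  simp [pvHasUniqueChars, pvCard_ofList]

lemma pvLoopA_skip (cs : List Char) (pl : Int) (xs ys : List Int)
    (h : ∀ x ∈ xs, x < pl) : pvLoopA cs pl (xs ++ ys) = pvLoopA cs pl ys := by
  induction xs with
  | nil => rfl
  | cons x xs ih =>
    simp only [List.cons_append, pvLoopA, if_pos (h x (by simp))]
    exact ih (fun x hx => h x (by simp [hx]))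

lemma pvWin_succ (cs : List Char) (plN k : Nat) (hk : k < cs.length) :
    pvWin cs plN k ++ [cs[k]] = (cs.take (k+1)).drop (k - plN) := by
  rw [List.take_add_one, List.getElem?_eq_getElem hk]
  simp only [Option.toList_some]
  rw [List.drop_append_of_le_length (by simp; omega)]
  rfl

lemma pvWin_succ_cons (cs : List Char) (plN k : Nat) (hk : k < cs.length) (hpl : plN ≤ k) :
    (cs.take (k+1)).drop (k - plN) = cs[k - plN] :: pvWin cs plN (k+1) := by
  rw [List.drop_eq_getElem_cons (by simp; omega)]
  congr 1
  · simp [List.getElem_take]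
  · simp [pvWin]; congr 1; omega

lemma pvWin_length (cs : List Char) (plN k : Nat) (h1 : plN ≤ k) (h2 : k ≤ cs.length) :
    (pvWin cs plN k).length = plN := by
  simp [pvWin]; omega

lemma pvSlice_win (cs : List Char) (plN j : Nat) (h1 : plN ≤ j) :
    PySem.List.slice cs (some ((j : Int) - (plN : Int))) (some (j : Int)) = pvWin cs plN j := by
  have h : (j : Int) - (plN : Int) = ((j - plN : Nat) : Int) := by omega
  rw [h, PySem.List.slice_natCast, pvWin, List.drop_take]

lemma pvStepB_inv (cs : List Char) (plN k : Nat) (hk : k < cs.length)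
    (counts : PySem.Dict Char Int) (distinct : Int)
    (hinv : pvInv cs plN k counts distinct) :
    pvInv cs plN (k+1)
      (pvStepB cs (plN : Int) (k : Int) cs[k] counts distinct).1
      (pvStepB cs (plN : Int) (k : Int) cs[k] counts distinct).2 := by
  obtain ⟨h1, h2⟩ := hinv
  have hu : pvWin cs plN k ++ [cs[k]] = (cs.take (k+1)).drop (k - plN) := pvWin_succ cs plN k hk
  have hC1 : ∀ c', (counts.insert cs[k] (counts.getD cs[k] 0 + 1)).getD c' 0
      = (((pvWin cs plN k ++ [cs[k]]).count c' : Nat) : Int) := by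
    intro c'
    rw [PySem.Dict.getD_insert]
    by_cases he : c' = cs[k]
    · subst he
      rw [if_pos rfl, h1]
      simp [List.count_append]
    · rw [if_neg he, h1]
      simp [List.count_append, Ne.symm he]
  have hD1 : (if counts.getD cs[k] 0 + 1 = 1 then distinct + 1 else distinct)
      = (((pvWin cs plN k ++ [cs[k]]).toFinset.card : Nat) : Int) := by
    rw [h1, h2]
    by_cases hm : cs[k] ∈ pvWin cs plN k
    · rw [if_neg (by have := List.count_pos_iff.2 hm; omega)]
      congr 2
      rw [List.toFinset_append]
      simp [hm]
    · rw [if_pos (by simp [List.count_eq_zero.2 hm])]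
      rw [show (pvWin cs plN k ++ [cs[k]]).toFinset = insert cs[k] (pvWin cs plN k).toFinset by
        simp [List.toFinset_append]]
      rw [Finset.card_insert_of_notMem (by simpa using hm)]
      push_cast
      ring
  simp only [pvStepB]
  by_cases hge : (plN : Int) ≤ (k : Int)
  · have hgeN : plN ≤ k := by omega
    have hidx : (k : Int) - (plN : Int) = ((k - plN : Nat) : Int) := by omega
    have hold : PySem.List.pyGetD cs ((k : Int) - (plN : Int)) cs[k] = cs[k - plN] := by
      rw [hidx, PySem.List.pyGetD_natCast, List.getD_eq_getElem cs cs[k] (by omega)]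
    have hcons : pvWin cs plN k ++ [cs[k]] = cs[k - plN] :: pvWin cs plN (k+1) := by
      rw [hu, pvWin_succ_cons cs plN k hk hgeN]
    rw [if_pos hge, hold]
    have hCu : ∀ c', (counts.insert cs[k] (counts.getD cs[k] 0 + 1)).getD c' 0
        = (((cs[k - plN] :: pvWin cs plN (k+1)).count c' : Nat) : Int) := by
      intro c'; rw [hC1 c', hcons]
    have hoc : (counts.insert cs[k] (counts.getD cs[k] 0 + 1)).getD cs[k - plN] 0 - 1
        = (((pvWin cs plN (k+1)).count cs[k - plN] : Nat) : Int) := by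
      rw [hCu]
      simp
    constructor
    · intro c'
      simp only
      rw [PySem.Dict.getD_insert]
      by_cases he : c' = cs[k - plN]
      · subst he
        rw [if_pos rfl, hoc]
      · rw [if_neg he, hCu c']
        congr 1
        simp [Ne.symm he]
    · simp only
      rw [hoc, hD1, hcons, List.toFinset_cons]
      by_cases hm : cs[k - plN] ∈ pvWin cs plN (k+1)
      · rw [if_neg (by have := List.count_pos_iff.2 hm; omega)]
        congr 2
        simp [hm]
      · rw [if_pos (by simp [List.count_eq_zero.2 hm])]
        rw [Finset.card_insert_of_notMem (by simpa using hm)]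
        push_cast
        ring
  · have ht : pvWin cs plN (k+1) = pvWin cs plN k ++ [cs[k]] := by
      rw [hu]
      unfold pvWin
      congr 1
      omega
    rw [if_neg hge]
    exact ⟨fun c' => by simp only; rw [hC1 c', ht], by simp only; rw [hD1, ht]⟩

lemma pvMain (cs : List Char) (plN : Nat) :
    ∀ k counts distinct, k ≤ cs.length → pvInv cs plN k counts distinct →
    pvLoopB cs (plN : Int) (PySem.List.enumerate (cs.drop k) k) counts distinct
      = pvLoopA cs (plN : Int)
          (PySem.List.pyRange (max (plN : Int) ((k : Int) + 1)) ((cs.length : Int) + 1) 1) := by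
  have H : ∀ m k counts distinct, cs.length - k = m → k ≤ cs.length →
      pvInv cs plN k counts distinct →
      pvLoopB cs (plN : Int) (PySem.List.enumerate (cs.drop k) k) counts distinct
        = pvLoopA cs (plN : Int)
            (PySem.List.pyRange (max (plN : Int) ((k : Int) + 1)) ((cs.length : Int) + 1) 1) := by
    intro m
    induction m with
    | zero =>
      intro k counts distinct hm hk _
      have hkn : k = cs.length := by omega
      subst hkn
      rw [List.drop_length, PySem.List.pyRange_one_eq_nil (by
        have := le_max_right (plN : Int) ((cs.length : Int) + 1); omega)]
      rfl
    | succ m ih =>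
      intro k counts distinct hm hk hinv
      have hklt : k < cs.length := by omega
      rw [List.drop_eq_getElem_cons hklt, PySem.List.enumerate_cons]
      simp only [pvLoopB]
      obtain ⟨hc1, hc2⟩ := pvStepB_inv cs plN k hklt counts distinct hinv
      have hrec := ih (k+1) (pvStepB cs (plN : Int) (k : Int) cs[k] counts distinct).1
        (pvStepB cs (plN : Int) (k : Int) cs[k] counts distinct).2 (by omega) (by omega) ⟨hc1, hc2⟩
      push_cast at hrec
      by_cases hup : plN ≤ k + 1
      · rw [max_eq_right (by exact_mod_cast hup : (plN : Int) ≤ (k : Int) + 1),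
          PySem.List.pyRange_one_cons (by
            have : (k : Int) < (cs.length : Int) := by exact_mod_cast hklt
            omega)]
        simp only [pvLoopA]
        rw [if_neg (by omega : ¬ ((k : Int) + 1 < (plN : Int)))]
        have hsl : PySem.List.slice cs (some ((k : Int) + 1 - (plN : Int))) (some ((k : Int) + 1))
            = pvWin cs plN (k+1) := by
          have hcast : (k : Int) + 1 = ((k + 1 : Nat) : Int) := by push_cast; ring
          rw [hcast]
          exact pvSlice_win cs plN (k+1) hup
        rw [hsl]
        by_cases huq : (pvWin cs plN (k+1)).toFinset.card = plN
        · rw [if_pos ⟨by omega, by rw [hc2, huq]⟩,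
            if_pos ((pvHasUnique_iff _).2 (by
              rw [pvWin_length cs plN (k+1) hup (by omega)]; exact huq))]
        · rw [if_neg (by
              rintro ⟨-, h⟩
              rw [hc2] at h
              exact huq (by exact_mod_cast h)),
            if_neg (by
              intro hTrue
              exact huq (by
                have := (pvHasUnique_iff _).1 hTrue
                rwa [pvWin_length cs plN (k+1) hup (by omega)] at this))]
          rw [hrec]
          congr 2
          exact max_eq_right (by omega)
      · rw [if_neg (by rintro ⟨h, -⟩; omega)]
        rw [hrec]
        congr 2
        rw [max_eq_left (by omega), max_eq_left (by omega)]
  intro k counts distinct hk hinv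
  exact H _ k counts distinct rfl hk hinv

-- ===== VERDICT (by name: the statement is the Claim_ definition above) =====
theorem find_pattern_position_spec : Claim_equal_find_pattern_position := by
  unfold Claim_equal_find_pattern_position Spec_find_pattern_position
  intro line pl _
  unfold find_pattern_position find_pattern_position_alt
  by_cases h0 : pl ≤ 0 ∨ (line.toList.length : Int) < pl
  · rw [if_pos h0]
    rcases h0 with h0 | h0
    · rw [PySem.List.pyRange_one_cons (by omega)]
      simp only [pvLoopA]
      rw [if_neg (by omega : ¬ ((0 : Int) < pl))]
      have hsl : PySem.List.slice line.toList (some (0 - pl)) (some 0) = ([] : List Char) := by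
        rw [PySem.List.slice_toNat line.toList (by omega) (by omega)]
        simp
      rw [hsl, if_pos (by decide)]
    · by_cases hneg : pl ≤ 0
      · rw [PySem.List.pyRange_one_cons (by omega)]
        simp only [pvLoopA]
        rw [if_neg (by omega : ¬ ((0 : Int) < pl))]
        have hsl : PySem.List.slice line.toList (some (0 - pl)) (some 0) = ([] : List Char) := by
          rw [PySem.List.slice_toNat line.toList (by omega) (by omega)]
          simp
        rw [hsl, if_pos (by decide)]
      · have := pvLoopA_skip line.toList pl
          (PySem.List.pyRange 0 ((line.toList.length : Int) + 1) 1) [] (by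
            intro x hx
            rw [PySem.List.mem_pyRange_one] at hx
            omega)
        simpa using this
  · rw [if_neg h0]
    obtain ⟨hpos, hle⟩ : 0 < pl ∧ pl ≤ (line.toList.length : Int) := by omega
    have hpl : pl = (pl.toNat : Int) := by omega
    have hinv0 : pvInv line.toList pl.toNat 0 PySem.Dict.empty 0 := by
      constructor
      · intro c
        simp [pvWin, PySem.Dict.getD, PySem.Dict.get?, PySem.Dict.empty]
      · simp [pvWin]
    have h := pvMain line.toList pl.toNat 0 PySem.Dict.empty 0 (by omega) hinv0
    rw [List.drop_zero] at h
    rw [hpl]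
    rw [show ((0 : Nat) : Int) = (0 : Int) by norm_num] at h
    rw [h]
    rw [show max ((pl.toNat : Int)) ((0 : Int) + 1) = (pl.toNat : Int) by omega]
    rw [PySem.List.pyRange_one_append 0 (pl.toNat : Int) ((line.toList.length : Int) + 1)
      (by omega) (by omega)]
    rw [pvLoopA_skip line.toList (pl.toNat : Int) _ _ (by
      intro x hx
      rw [PySem.List.mem_pyRange_one] at hx
      omega)]
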